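-- pv_equiv track=rewrite | github.com/s7-esKim/BJstudy | 김은석/백준/ES_2116.py | check
-- ===== SOURCE A (Python) =====
-- def check(li, num):
--   for i in range(0,6):
--     if num == li[i]:
--       idx = i
--       break
--   if idx == 0:
--     return (max(li[1], li[2], li[3], li[4]) , li[5])
--   elif idx == 5:
--     return (max(li[1], li[2], li[3], li[4]) , li[0])
--   elif idx == 1:
--     return (max(li[0], li[2], li[5], li[4]) , li[3])
--   elif idx == 3:
--     return (max(li[0], li[2], li[5], li[4]) , li[1])
--   elif idx == 2:
--     return (max(li[0], li[1], li[5], li[3]), li[4])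
--   elif idx == 4:
--     return (max(li[0], li[1], li[5], li[3]), li[2])
-- ===== SOURCE B (Python) =====
-- def check(li, num):
--     # Treat the die as its three opposite-face pairs (0,5), (1,3), (2,4):
--     # one pass over the pairs; the pair holding num yields the bottom face
--     # (index a+b-i), the other two pairs feed the running side maximum.
--     # (Where num is absent from the first six faces A raises; so does .index.)
--     i = li.index(num, 0, 6)
--     others_max = None
--     for a, b in ((0, 5), (1, 3), (2, 4)):
--         if i == a or i == b:
--             opposite = li[a + b - i]
--         else:
--             m = li[a] if li[a] >= li[b] else li[b]
--             if others_max is None or m > others_max: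
--                 others_max = m
--     return (others_max, opposite)
-- ===== Notes on version B (the rewrite author's own statement) =====
-- stated objective: alternative
-- what changed: B drops A's six-way if/elif cascade: it finds num with list.index and then makes one pass over the die's three opposite-face pairs (0,5),(1,3),(2,4), taking the bottom face as li[a+b-i] from num's pair and folding a running maximum over the other two pairs.
import Mathlib
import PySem

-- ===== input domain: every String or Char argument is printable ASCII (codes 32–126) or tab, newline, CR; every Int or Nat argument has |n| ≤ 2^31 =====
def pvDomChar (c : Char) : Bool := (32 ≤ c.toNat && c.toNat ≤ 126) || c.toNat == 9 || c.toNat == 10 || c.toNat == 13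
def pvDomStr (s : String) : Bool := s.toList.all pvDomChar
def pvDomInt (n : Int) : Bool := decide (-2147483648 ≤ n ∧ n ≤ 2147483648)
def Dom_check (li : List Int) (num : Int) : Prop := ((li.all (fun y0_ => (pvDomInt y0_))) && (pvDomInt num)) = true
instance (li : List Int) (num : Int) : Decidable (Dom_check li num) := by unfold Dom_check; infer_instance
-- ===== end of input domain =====

-- B replaces A's linear search plus six-way if/elif cascade by one pass over the
-- three opposite-face pairs of the die with a running maximum (objective: simpler).

-- ===== PORT A =====
-- the 'for i in range(0,6): if num == li[i]: idx = i; break' loop of A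
def checkLoop (num : Int) (li : List Int) : List Nat → Option Nat
  | [] => none
  | i :: rest => if num = li.getD i 0 then some i else checkLoop num li rest

def check (li : List Int) (num : Int) : Int × Int :=
  match checkLoop num li (List.range 6) with
  | none => (0, 0)  -- Python raises UnboundLocalError here; excluded by Pre_check
  | some idx =>
    let g := fun j => li.getD j 0  -- li[j]; always in range under Pre_check
    if idx = 0 then (max (max (max (g 1) (g 2)) (g 3)) (g 4), g 5)
    else if idx = 5 then (max (max (max (g 1) (g 2)) (g 3)) (g 4), g 0)
    else if idx = 1 then (max (max (max (g 0) (g 2)) (g 5)) (g 4), g 3)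
    else if idx = 3 then (max (max (max (g 0) (g 2)) (g 5)) (g 4), g 1)
    else if idx = 2 then (max (max (max (g 0) (g 1)) (g 5)) (g 3), g 4)
    else if idx = 4 then (max (max (max (g 0) (g 1)) (g 5)) (g 3), g 2)
    else (0, 0)  -- unreachable: idx ∈ range 6

-- ===== PORT B =====
def check_alt (li : List Int) (num : Int) : Int × Int :=
  match PySem.List.index? (PySem.List.slice li (some 0) (some 6)) num with  -- li.index(num, 0, 6)
  | none => (0, 0)  -- Python raises ValueError here; excluded by Pre_check
  | some i =>
    -- one pass over the three opposite-face pairs, as in Source B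
    let st := [((0:Nat), (5:Nat)), (1, 3), (2, 4)].foldl
      (fun (st : Option Int × Int) p =>
        let a := p.1; let b := p.2
        if i = a ∨ i = b then
          (st.1, li.getD (a + b - i) 0)   -- li[a+b-i]; in range under Pre_check
        else
          let m := if li.getD a 0 ≥ li.getD b 0 then li.getD a 0 else li.getD b 0
          (match st.1 with
           | none => some m
           | some om => some (if m > om then m else om), st.2))
      (none, 0)   -- 'opposite' is unbound in Python until assigned; assigned under Pre_check
    (st.1.getD 0, st.2)

-- ===== PRECONDITION & SPEC =====
-- Pre_check: exactly the inputs where Python A returns normally: li must have at least 6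
-- elements and num must occur among the first 6 (otherwise IndexError / UnboundLocalError).
def Pre_check (li : List Int) (num : Int) : Prop := 6 ≤ li.length ∧ num ∈ li.take 6
instance (li : List Int) (num : Int) : Decidable (Pre_check li num) := by unfold Pre_check; infer_instance
def pvWitness_check : List Int × Int := ([1, 2, 3, 4, 5, 6], 3)

def Spec_check (li : List Int) (num : Int) (out : Int × Int) : Prop := out = check_alt li num
instance (li : List Int) (num : Int) (out : Int × Int) : Decidable (Spec_check li num out) := by unfold Spec_check; infer_instance

-- ===== CLAIM (what is proved, stated in full; the proofs are below) =====
def Claim_equal_check : Prop := ∀ (li : List Int) (num : Int), Dom_check li num → Pre_check li num → Spec_check li num (check li num)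

-- ===== LEMMAS AND PROOFS =====

-- li[0:6] is the 6-element prefix (proof-side bridge for the numeral bound)
theorem slice_to_six (li : List Int) : PySem.List.slice li none (some 6) = li.take 6 := by
  simpa using PySem.List.slice_to_natCast li 6

-- ===== VERDICT (by name: the statement is the Claim_ definition above) =====
theorem check_spec : Claim_equal_check := by
  intro li num _ hpre
  unfold Spec_check
  obtain ⟨hlen, hmem⟩ := hpre
  match li with
  | [] | [_] | [_,_] | [_,_,_] | [_,_,_,_] | [_,_,_,_,_] => simp at hlen
  | a :: b :: c :: d :: e :: f :: t =>
    simp [List.take] at hmem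
    by_cases h0 : a = num
    · subst h0
      simp [check, check_alt, checkLoop, List.range_succ, slice_to_six,
            PySem.List.index?_eq_idxOf?, List.idxOf?, List.findIdx?_cons, List.take]
      simp only [max_def]
      split_ifs <;> omega
    · by_cases h1 : b = num
      · subst h1
        simp [check, check_alt, checkLoop, List.range_succ, slice_to_six,
              PySem.List.index?_eq_idxOf?, List.idxOf?, List.findIdx?_cons, beq_iff_eq, List.take,
              h0, Ne.symm h0]
        simp only [max_def]
        split_ifs <;> omega
      · by_cases h2 : c = num
        · subst h2
          simp [check, check_alt, checkLoop, List.range_succ, slice_to_six,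
                PySem.List.index?_eq_idxOf?, List.idxOf?, List.findIdx?_cons, beq_iff_eq, List.take,
                h0, Ne.symm h0, h1, Ne.symm h1]
          simp only [max_def]
          split_ifs <;> omega
        · by_cases h3 : d = num
          · subst h3
            simp [check, check_alt, checkLoop, List.range_succ, slice_to_six,
                  PySem.List.index?_eq_idxOf?, List.idxOf?, List.findIdx?_cons, beq_iff_eq, List.take,
                  h0, Ne.symm h0, h1, Ne.symm h1, h2, Ne.symm h2]
            simp only [max_def]
            split_ifs <;> omega
          · by_cases h4 : e = num
            · subst h4
              simp [check, check_alt, checkLoop, List.range_succ, slice_to_six,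
                    PySem.List.index?_eq_idxOf?, List.idxOf?, List.findIdx?_cons, beq_iff_eq, List.take,
                    h0, Ne.symm h0, h1, Ne.symm h1, h2, Ne.symm h2, h3, Ne.symm h3]
              simp only [max_def]
              split_ifs <;> omega
            · have h5 : f = num := by tauto
              subst h5
              simp [check, check_alt, checkLoop, List.range_succ, slice_to_six,
                    PySem.List.index?_eq_idxOf?, List.idxOf?, List.findIdx?_cons, beq_iff_eq, List.take,
                    h0, Ne.symm h0, h1, Ne.symm h1, h2, Ne.symm h2, h3, Ne.symm h3, h4, Ne.symm h4]
              simp only [max_def]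
              split_ifs <;> omega
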